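-- pv_equiv track=rewrite | github.com/davgra04/dgCHIP8 | tools/decompiler.py | binary_viz
-- ===== SOURCE A (Python) =====
-- def binary_viz(data):
--     viz = ""
--     for i in reversed(range(16)):
--         if i == 7:
--             viz += " "
--
--         if (data >> i) & 0x1:
--             viz += "■"
--             # viz += "▉"
--         else:
--             # viz += "□"
--             viz += "_"
--     return viz
-- ===== SOURCE B (Python) =====
-- def binary_viz(data):
--     bits = format(data & 0xFFFF, '016b')
--     glyphs = bits.translate(str.maketrans({'0': '_', '1': '■'}))
--     return glyphs[:8] + ' ' + glyphs[8:]
-- ===== Notes on version B (the rewrite author's own statement) =====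
-- stated objective: idiomatic
-- what changed: B replaces A's 16-iteration shift-and-test loop with per-bit branching by formatting the low 16 bits at once with format(data & 0xFFFF, '016b'), translating the digit string to glyphs with str.translate, and inserting the byte separator with slicing.
import Mathlib
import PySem

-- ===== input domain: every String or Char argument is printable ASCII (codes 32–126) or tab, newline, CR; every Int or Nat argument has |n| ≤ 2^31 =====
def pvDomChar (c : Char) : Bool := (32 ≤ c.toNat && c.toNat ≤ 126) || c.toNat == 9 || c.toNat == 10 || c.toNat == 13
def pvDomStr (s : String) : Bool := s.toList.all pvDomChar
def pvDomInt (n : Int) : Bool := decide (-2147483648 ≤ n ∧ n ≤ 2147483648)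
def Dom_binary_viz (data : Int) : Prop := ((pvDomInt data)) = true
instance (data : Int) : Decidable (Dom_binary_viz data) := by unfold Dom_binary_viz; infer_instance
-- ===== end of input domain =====

-- B builds the whole 16-bit binary string at once (format/translate/slice) instead of A's
-- 16-iteration bit-extraction loop with per-bit branches; objective: idiomatic, same cost.

-- ===== PORT A =====
def binary_viz (data : Int) : String :=
  -- literal port of A: viz accumulates over i = 15,14,...,0 (reversed(range(16)));
  -- i.toNat is exact since every i produced by the range is nonnegative; (data >> i) & 1
  -- is Lean's >>> with PySem.Int.band; Python truthiness of the 0/1 result is `≠ 0`.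
  ((PySem.List.pyRange 0 16 1).reverse).foldl
    (fun viz i =>
      let viz := if i = 7 then viz ++ " " else viz
      if PySem.Int.band (data >>> (i.toNat : Nat)) 1 ≠ 0 then viz ++ "■" else viz ++ "_")
    ""

-- ===== PORT B =====
def binary_viz_alt (data : Int) : String :=
  -- literal port of B: n = data & 0xFFFF, so 0 ≤ n < 2^16 and format(n, '016b') is exactly
  -- the 16 binary digits of n, most significant first; translate maps '0'→'_', '1'→'■' and
  -- leaves any other char unchanged; the slices glyphs[:8] / glyphs[8:] are take/drop.
  let n : Nat := (PySem.Int.band data 65535).toNat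
  let bits : List Char := (List.range 16).map (fun j => if n.testBit (15 - j) then '1' else '0')
  let glyphs : List Char := bits.map (fun c => if c = '0' then '_' else if c = '1' then '■' else c)
  String.ofList (glyphs.take 8) ++ " " ++ String.ofList (glyphs.drop 8)

-- ===== PRECONDITION & SPEC =====
def Spec_binary_viz (data : Int) (out : String) : Prop := out = binary_viz_alt data
instance (data : Int) (out : String) : Decidable (Spec_binary_viz data out) := by unfold Spec_binary_viz; infer_instance

-- ===== CLAIM (what is proved, stated in full; the proofs are below) =====
def Claim_equal_binary_viz : Prop := ∀ (data : Int), Dom_binary_viz data → Spec_binary_viz data (binary_viz data)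

-- ===== LEMMAS AND PROOFS =====

-- data & 0xFFFF selects the low 16 bits, i.e. data mod 2^16
lemma pv_mask (data : Int) : PySem.Int.band data 65535 = data % 65536 := by
  rcases le_or_gt 0 data with h | h
  · rw [PySem.Int.band_of_nonneg h (by norm_num)]
    have h2 : (65535:Int).toNat = 2 ^ 16 - 1 := rfl
    rw [h2, Nat.and_two_pow_sub_one_eq_mod]
    omega
  · show (if 0 ≤ data then _ else _) = _
    rw [if_neg (by omega), if_pos (by norm_num)]
    have h2 : (65535:Int).toNat = 2 ^ 16 - 1 := rfl
    rw [h2, Nat.and_comm, Nat.and_two_pow_sub_one_eq_mod]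
    omega

-- bit k of data (k < 16) is bit k of data mod 2^16
lemma pv_bit (data : Int) (k : Nat) (hk : k < 16) :
  PySem.Int.band (data >>> k) 1 = if ((data % 65536).toNat).testBit k then 1 else 0 := by
  rw [PySem.Int.band_one]
  show (data >>> k).fmod 2 = _
  rw [Int.fmod_eq_emod, Int.shiftRight_eq_div_pow]
  simp only [Nat.testBit, Nat.one_and_eq_mod_two, Nat.shiftRight_eq_div_pow, bne_iff_ne]
  interval_cases k <;> (norm_num; split_ifs with hb <;> omega)

-- the string contributed by iteration i of A's loop
def pv_m (data : Int) (i : Int) : String :=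
  (if i = 7 then " " else "") ++ (if PySem.Int.band (data >>> (i.toNat : Nat)) 1 ≠ 0 then "■" else "_")

-- a foldl that only appends, read as a list of characters
lemma pv_foldl_toList (f : String → Int → String) (m : Int → String)
  (hf : ∀ a x, f a x = a ++ m x) (l : List Int) (b : String) :
  (l.foldl f b).toList = b.toList ++ l.flatMap (fun x => (m x).toList) := by
  induction l generalizing b with
  | nil => simp
  | cons x xs ih => simp [hf, ih, String.toList_append]

-- ===== VERDICT (by name: the statement is the Claim_ definition above) =====
theorem binary_viz_spec : Claim_equal_binary_viz := by
  intro data _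
  unfold Spec_binary_viz
  rw [← String.toList_inj]
  unfold binary_viz binary_viz_alt
  rw [pv_foldl_toList _ (pv_m data)
      (by intro a x; unfold pv_m; split_ifs <;> simp [String.append_assoc])]
  have hrev : (PySem.List.pyRange 0 16 1).reverse = [15,14,13,12,11,10,9,8,7,6,5,4,3,2,1,0] := by decide
  rw [hrev]
  have hcond : ∀ (b : Bool), ((if b = true then (1:Int) else 0) ≠ 0) = (b = true) := by
    intro b; cases b <;> simp
  simp only [List.flatMap_cons, List.flatMap_nil, pv_m, Int.reduceToNat, Int.toNat_zero,
    Int.toNat_one, Int.reduceEq, reduceIte]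
  simp only [pv_bit data 15 (by norm_num), pv_bit data 14 (by norm_num), pv_bit data 13 (by norm_num),
      pv_bit data 12 (by norm_num), pv_bit data 11 (by norm_num), pv_bit data 10 (by norm_num),
      pv_bit data 9 (by norm_num), pv_bit data 8 (by norm_num), pv_bit data 7 (by norm_num),
      pv_bit data 6 (by norm_num), pv_bit data 5 (by norm_num), pv_bit data 4 (by norm_num),
      pv_bit data 3 (by norm_num), pv_bit data 2 (by norm_num), pv_bit data 1 (by norm_num),
      pv_bit data 0 (by norm_num)]
  simp only [hcond, pv_mask]
  have h1 : "■".toList = ['■'] := rfl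
  have h2 : "_".toList = ['_'] := rfl
  have h3 : " ".toList = [' '] := rfl
  have hsingle : ∀ (c : Prop) [Decidable c] (x y : Char), (if c then [x] else [y]) = [if c then x else y] := by
    intro c _ x y; split_ifs <;> rfl
  simp [List.range_succ, String.toList_append, apply_ite String.toList, h1, h2, h3, hsingle]
  repeat' apply And.intro
  all_goals split_ifs <;> first | rfl | simp_all
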